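-- pv_equiv track=rewrite | github.com/mikeg0321/Reytech-RFQ | src/agents/form_profiler.py | _match_stem_to_semantic
-- ===== SOURCE A (Python) =====
-- def _match_stem_to_semantic(stems: list[str]) -> dict[str, str]:
--     """Match row-field stems to canonical row semantics via keyword rules.
--
--     Deterministic — no LLM. If a stem does not clearly map, it stays None
--     and the operator sees a `# TODO (auto)` in the YAML draft.
--     """
--     # Ordered keyword rules — MORE specific first.
--     rules: list[tuple[str, str]] = [
--         ("substitut",          "items[n].substituted"),
--         ("qty per uom",        "items[n].qty_per_uom"),
--         ("unit of measure",    "items[n].uom"),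
--         ("uom",                "items[n].uom"),
--         ("price per unit",     "items[n].unit_price"),
--         ("unit price",         "items[n].unit_price"),
--         ("extension",          "items[n].extension"),
--         ("item description",   "items[n].description"),
--         ("description",        "items[n].description"),
--         ("qty",                "items[n].qty"),
--         ("quantity",           "items[n].qty"),
--         ("item",               "items[n].item_no"),
--     ]
--     out: dict[str, str] = {}
--     for stem in stems:
--         s_norm = stem.lower()
--         chosen = ""
--         for needle, semantic in rules:
--             if needle in s_norm:
--                 chosen = semantic
--                 break
--         out[stem] = chosen
--     return out
-- ===== SOURCE B (Python) =====
-- # Ordered keyword rules -- MORE specific first (same table as A).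
-- _SEM_RULES: list[tuple[str, str]] = [
--     ("substitut",          "items[n].substituted"),
--     ("qty per uom",        "items[n].qty_per_uom"),
--     ("unit of measure",    "items[n].uom"),
--     ("uom",                "items[n].uom"),
--     ("price per unit",     "items[n].unit_price"),
--     ("unit price",         "items[n].unit_price"),
--     ("extension",          "items[n].extension"),
--     ("item description",   "items[n].description"),
--     ("description",        "items[n].description"),
--     ("qty",                "items[n].qty"),
--     ("quantity",           "items[n].qty"),
--     ("item",               "items[n].item_no"),
-- ]
--
--
-- def _match_stem_to_semantic(stems: list[str]) -> dict[str, str]: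
--     """Rule-major pass: assign each rule's semantic to the stems it matches,
--     in priority order, marking stems resolved; unmatched stems keep ""."""
--     out: dict[str, str] = {stem: "" for stem in stems}
--     resolved: set[str] = set()
--     for needle, semantic in _SEM_RULES:
--         for stem in stems:
--             if stem not in resolved and needle in stem.lower():
--                 out[stem] = semantic
--                 resolved.add(stem)
--     return out
-- ===== Notes on version B (the rewrite author's own statement) =====
-- stated objective: alternative
-- what changed: Inverts the loop nesting: B iterates the ordered rules as the outer loop and assigns each rule's semantic to all not-yet-resolved matching stems (tracked in a set), instead of A's per-stem scan of the rule list with break; unresolved stems keep "" from the initial dict.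
import Mathlib
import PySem

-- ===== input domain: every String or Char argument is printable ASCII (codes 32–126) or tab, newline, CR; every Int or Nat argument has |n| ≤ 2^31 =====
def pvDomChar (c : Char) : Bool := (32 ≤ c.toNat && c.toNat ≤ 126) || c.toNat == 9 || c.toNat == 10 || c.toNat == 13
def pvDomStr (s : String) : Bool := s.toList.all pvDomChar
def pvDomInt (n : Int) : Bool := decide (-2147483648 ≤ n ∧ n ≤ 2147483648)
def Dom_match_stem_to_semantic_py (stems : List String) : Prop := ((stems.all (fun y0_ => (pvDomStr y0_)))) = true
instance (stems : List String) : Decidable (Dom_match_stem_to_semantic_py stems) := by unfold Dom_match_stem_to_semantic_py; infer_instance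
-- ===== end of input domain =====

-- B differs from A only in decomposition: rule-major outer loop with a resolved set
-- instead of A's stem-major scan with break; same exact result, proved equal below.

-- The ordered keyword rule table, shared data of both programs.
def pvRules : List (String × String) :=
  [ ("substitut",          "items[n].substituted"),
    ("qty per uom",        "items[n].qty_per_uom"),
    ("unit of measure",    "items[n].uom"),
    ("uom",                "items[n].uom"),
    ("price per unit",     "items[n].unit_price"),
    ("unit price",         "items[n].unit_price"),
    ("extension",          "items[n].extension"),
    ("item description",   "items[n].description"),
    ("description",        "items[n].description"),
    ("qty",                "items[n].qty"),
    ("quantity",           "items[n].qty"),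
    ("item",               "items[n].item_no") ]

-- ===== PORT A =====
-- A's inner 'for needle, semantic in rules: if needle in s_norm: chosen = semantic; break'
def pvChooseA (rules : List (String × String)) (sNorm : String) : String :=
  match rules with
  | [] => ""
  | (needle, semantic) :: rest =>
      if PySem.Str.isIn needle sNorm then semantic else pvChooseA rest sNorm

def match_stem_to_semantic_py (stems : List String) : List (String × String) :=
  (stems.foldl
    (fun (out : PySem.Dict String String) stem =>
      out.insert stem (pvChooseA pvRules (PySem.Str.lower stem)))
    PySem.Dict.empty).items

-- ===== PORT B =====
-- B's inner 'if stem not in resolved and needle in stem.lower(): out[stem]=semantic; resolved.add(stem)'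
def pvRuleStep (needle semantic : String)
    (st : PySem.Dict String String × PySem.Set String) (stem : String) :
    PySem.Dict String String × PySem.Set String :=
  if !PySem.Set.contains st.2 stem && PySem.Str.isIn needle (PySem.Str.lower stem) then
    (st.1.insert stem semantic, PySem.Set.add st.2 stem)
  else st

def match_stem_to_semantic_py_alt (stems : List String) : List (String × String) :=
  let out0 : PySem.Dict String String :=
    stems.foldl (fun d stem => d.insert stem "") PySem.Dict.empty
  (pvRules.foldl
    (fun st rule => stems.foldl (pvRuleStep rule.1 rule.2) st)
    (out0, PySem.Set.empty)).1.items

-- ===== PRECONDITION & SPEC =====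
def Spec_match_stem_to_semantic_py (stems : List String) (out : List (String × String)) : Prop := out = match_stem_to_semantic_py_alt stems
instance (stems : List String) (out : List (String × String)) : Decidable (Spec_match_stem_to_semantic_py stems out) := by unfold Spec_match_stem_to_semantic_py; infer_instance

-- ===== CLAIM (what is proved, stated in full; the proofs are below) =====
def Claim_equal_match_stem_to_semantic_py : Prop := ∀ (stems : List String), Dom_match_stem_to_semantic_py stems → Spec_match_stem_to_semantic_py stems (match_stem_to_semantic_py stems)

-- ===== LEMMAS AND PROOFS =====

-- pvChooseA with the default value threaded explicitly (proof-only helper).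
def pvChooseAD (rules : List (String × String)) (sNorm dflt : String) : String :=
  match rules with
  | [] => dflt
  | (needle, semantic) :: rest =>
      if PySem.Str.isIn needle sNorm then semantic else pvChooseAD rest sNorm dflt

lemma pvChooseAD_empty (rules : List (String × String)) (t : String) :
    pvChooseAD rules t "" = pvChooseA rules t := by
  induction rules with
  | nil => rfl
  | cons r rest ih => cases r with | mk n s => simp [pvChooseAD, pvChooseA, ih]

-- getD of a fold inserting f x for each x.
lemma getD_foldl_insert_fun (f : String → String) (l : List String)
    (d : PySem.Dict String String) (s : String) :
    (l.foldl (fun d x => d.insert x (f x)) d).getD s "" =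
      if s ∈ l then f s else d.getD s "" := by
  induction l generalizing d with
  | nil => simp
  | cons x l ih =>
      simp only [List.foldl_cons, ih, PySem.Dict.getD_insert, List.mem_cons]
      by_cases hsl : s ∈ l <;> by_cases hsx : s = x <;> simp [hsl, hsx]

-- a Nodup-keyed dict's items are its keys paired with their getD values.
lemma items_eq_keys_map (d : PySem.Dict String String) (h : d.keys.Nodup) :
    d.items = d.keys.map (fun k => (k, d.getD k "")) := by
  have h1 : d.keys.map (fun k => (k, d.getD k "")) =
      d.items.map (fun p => (p.1, d.getD p.1 "")) := by
    simp only [PySem.Dict.keys, List.map_map]; rfl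
  have h2 : d.items.map (fun p => (p.1, d.getD p.1 "")) = d.items.map id := by
    apply List.map_congr_left
    rintro ⟨k, v⟩ hp
    have hv : d.getD k "" = v := PySem.Dict.getD_of_mem_items d hp h ""
    simp [hv]
  rw [h1, h2, List.map_id]

lemma contains_false_of_not_mem (s : PySem.Set String) (x : String) (h : x ∉ s) :
    PySem.Set.contains s x = false := by
  cases hb : PySem.Set.contains s x with
  | false => rfl
  | true => exact absurd ((PySem.Set.contains_iff s x).mp hb) h

-- inner loop (one rule over the stems): the resolved set afterwards
lemma innerSnd (needle sem : String) (l : List String)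
    (st : PySem.Dict String String × PySem.Set String) (s : String) :
    (s ∈ (l.foldl (pvRuleStep needle sem) st).2) ↔
      s ∈ st.2 ∨ (s ∈ l ∧ PySem.Str.isIn needle (PySem.Str.lower s) = true) := by
  induction l generalizing st with
  | nil => simp
  | cons x l ih =>
      by_cases hr : x ∈ st.2
      · have hcon := (PySem.Set.contains_iff st.2 x).mpr hr
        simp only [List.foldl_cons, pvRuleStep, hcon, Bool.not_true, Bool.false_and,
          Bool.false_eq_true, if_false, ih, List.mem_cons]
        by_cases hsx : s = x
        · subst hsx; tauto
        · simp [hsx]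
      · have hcon := contains_false_of_not_mem st.2 x hr
        by_cases hm : PySem.Str.isIn needle (PySem.Str.lower x) = true
        · simp only [List.foldl_cons, pvRuleStep, hcon, hm, Bool.not_false, Bool.true_and,
            if_true, ih, PySem.Set.mem_add, List.mem_cons]
          by_cases hsx : s = x
          · subst hsx; tauto
          · simp only [hsx, or_false, false_or]
        · simp only [List.foldl_cons, pvRuleStep, hcon, Bool.not_false, Bool.true_and, hm,
            Bool.false_eq_true, if_false, ih, List.mem_cons]
          by_cases hsx : s = x
          · subst hsx; tauto
          · simp [hsx]

-- inner loop: getD of the dict afterwards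
lemma innerGetD (needle sem : String) (l : List String)
    (st : PySem.Dict String String × PySem.Set String) (s : String) :
    (l.foldl (pvRuleStep needle sem) st).1.getD s "" =
      if s ∈ l ∧ s ∉ st.2 ∧ PySem.Str.isIn needle (PySem.Str.lower s) = true
      then sem else st.1.getD s "" := by
  induction l generalizing st with
  | nil => simp
  | cons x l ih =>
      by_cases hr : x ∈ st.2
      · have hcon := (PySem.Set.contains_iff st.2 x).mpr hr
        simp only [List.foldl_cons, pvRuleStep, hcon, Bool.not_true, Bool.false_and,
          Bool.false_eq_true, if_false, ih, List.mem_cons]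
        by_cases hsx : s = x
        · subst hsx; simp [hr]
        · simp [hsx]
      · have hcon := contains_false_of_not_mem st.2 x hr
        by_cases hm : PySem.Str.isIn needle (PySem.Str.lower x) = true
        · have hm2 : PySem.Chars.isIn needle.toList (PySem.Chars.lower x.toList) = true := by
            simpa using hm
          simp only [List.foldl_cons, pvRuleStep, hcon, hm, Bool.not_false, Bool.true_and,
            if_true, ih, PySem.Set.mem_add, List.mem_cons, PySem.Dict.getD_insert]
          by_cases hsx : s = x
          · subst hsx; simp [hr, hm2]
          · simp [hsx]
        · have hm2 : PySem.Chars.isIn needle.toList (PySem.Chars.lower x.toList) = false := by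
            simpa using hm
          simp only [List.foldl_cons, pvRuleStep, hcon, Bool.not_false, Bool.true_and, hm,
            Bool.false_eq_true, if_false, ih, List.mem_cons]
          by_cases hsx : s = x
          · subst hsx; simp [hm2]
          · simp [hsx]

-- inner loop: the dict's keys do not change when every stem is already a key
lemma innerKeys (needle sem : String) (l : List String)
    (st : PySem.Dict String String × PySem.Set String)
    (h : ∀ x ∈ l, x ∈ st.1.keys) :
    (l.foldl (pvRuleStep needle sem) st).1.keys = st.1.keys := by
  induction l generalizing st with
  | nil => rfl
  | cons x l ih =>
      simp only [List.foldl_cons, pvRuleStep]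
      by_cases hc : (!PySem.Set.contains st.2 x && PySem.Str.isIn needle (PySem.Str.lower x)) = true
      · rw [if_pos hc]
        have hx : (st.1.insert x sem).keys = st.1.keys :=
          PySem.Dict.keys_insert_of_contains st.1 sem
            ((PySem.Dict.contains_iff_mem_keys st.1 x).mpr (h x List.mem_cons_self))
        rw [ih]
        · exact hx
        · intro y hy; rw [hx]; exact h y (List.mem_cons_of_mem _ hy)
      · rw [if_neg hc]
        exact ih st (fun y hy => h y (List.mem_cons_of_mem _ hy))

-- outer loop over the rules: keys preserved
lemma outerKeys (rs : List (String × String)) (stems : List String)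
    (st : PySem.Dict String String × PySem.Set String)
    (h : ∀ x ∈ stems, x ∈ st.1.keys) :
    ((rs.foldl (fun st rule => stems.foldl (pvRuleStep rule.1 rule.2) st) st)).1.keys
      = st.1.keys := by
  induction rs generalizing st with
  | nil => rfl
  | cons r rest ih =>
      simp only [List.foldl_cons]
      rw [ih, innerKeys _ _ _ _ h]
      intro x hx
      rw [innerKeys _ _ _ _ h]; exact h x hx

-- outer loop: getD afterwards is the first-matching-rule semantic
lemma outerGetD (rs : List (String × String)) (stems : List String)
    (st : PySem.Dict String String × PySem.Set String) (s : String)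
    (hs : s ∈ stems) :
    ((rs.foldl (fun st rule => stems.foldl (pvRuleStep rule.1 rule.2) st) st)).1.getD s "" =
      if s ∈ st.2 then st.1.getD s ""
      else pvChooseAD rs (PySem.Str.lower s) (st.1.getD s "") := by
  induction rs generalizing st with
  | nil => simp [pvChooseAD]
  | cons r rest ih =>
      cases r with | mk needle sem =>
      simp only [List.foldl_cons]
      rw [ih]
      by_cases hr : s ∈ st.2
      · have h2 : s ∈ (stems.foldl (pvRuleStep needle sem) st).2 :=
          (innerSnd needle sem stems st s).mpr (Or.inl hr)
        rw [if_pos h2, if_pos hr, innerGetD,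
          if_neg (by rintro ⟨_, hn, _⟩; exact hn hr)]
      · by_cases hm : PySem.Str.isIn needle (PySem.Str.lower s) = true
        · have h2 : s ∈ (stems.foldl (pvRuleStep needle sem) st).2 :=
            (innerSnd needle sem stems st s).mpr (Or.inr ⟨hs, hm⟩)
          rw [if_pos h2, if_neg hr, innerGetD, if_pos ⟨hs, hr, hm⟩]
          simp only [pvChooseAD]
          rw [if_pos hm]
        · have h2 : s ∉ (stems.foldl (pvRuleStep needle sem) st).2 := by
            rw [innerSnd]; rintro (h | h)
            · exact hr h
            · exact hm h.2
          rw [if_neg h2, if_neg hr, innerGetD, if_neg (by rintro ⟨_, _, h⟩; exact hm h)]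
          simp only [pvChooseAD]
          rw [if_neg hm]

-- ===== VERDICT (by name: the statement is the Claim_ definition above) =====

theorem match_stem_to_semantic_py_spec : Claim_equal_match_stem_to_semantic_py := by
  intro stems _
  unfold Spec_match_stem_to_semantic_py match_stem_to_semantic_py match_stem_to_semantic_py_alt
  set dA := stems.foldl
      (fun (out : PySem.Dict String String) stem =>
        out.insert stem (pvChooseA pvRules (PySem.Str.lower stem))) PySem.Dict.empty with hdA
  set out0 : PySem.Dict String String :=
      stems.foldl (fun d stem => d.insert stem "") PySem.Dict.empty with hout0
  set dB := (pvRules.foldl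
      (fun st rule => stems.foldl (pvRuleStep rule.1 rule.2) st)
      (out0, PySem.Set.empty)).1 with hdB
  have hkA : dA.keys = PySem.Set.ofList stems := by
    rw [hdA, PySem.Dict.keys_foldl_insert]
    simp [PySem.Set.update_nil_left, PySem.Dict.keys_empty]
  have hk0 : out0.keys = PySem.Set.ofList stems := by
    rw [hout0, PySem.Dict.keys_foldl_insert]
    simp [PySem.Set.update_nil_left, PySem.Dict.keys_empty]
  have hmem0 : ∀ x ∈ stems, x ∈ out0.keys := by
    intro x hx; rw [hk0]; exact (PySem.Set.mem_ofList stems x).mpr hx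
  have hkB : dB.keys = PySem.Set.ofList stems := by
    rw [hdB, outerKeys _ _ _ hmem0]; exact hk0
  have hnA : dA.keys.Nodup := by rw [hkA]; exact PySem.Set.nodup_ofList stems
  have hnB : dB.keys.Nodup := by rw [hkB]; exact PySem.Set.nodup_ofList stems
  rw [items_eq_keys_map dA hnA, items_eq_keys_map dB hnB, hkA, hkB]
  apply List.map_congr_left
  intro s hsM
  have hs : s ∈ stems := (PySem.Set.mem_ofList stems s).mp hsM
  have hA : dA.getD s "" = pvChooseA pvRules (PySem.Str.lower s) := by
    rw [hdA, getD_foldl_insert_fun (fun stem => pvChooseA pvRules (PySem.Str.lower stem))]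
    simp [hs]
  have h0 : out0.getD s "" = "" := by
    rw [hout0, getD_foldl_insert_fun (fun _ => "")]; simp [PySem.Dict.getD_empty]
  have hB : dB.getD s "" = pvChooseA pvRules (PySem.Str.lower s) := by
    rw [hdB, outerGetD _ _ _ _ hs, h0, pvChooseAD_empty]
    simp [PySem.Set.empty]
  rw [hA, hB]
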